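-- pv_equiv track=rewrite | github.com/rotkonetworks/nanoctm | data/sft/parse_zsh_history.py | is_sensitive
-- ===== SOURCE A (Python) =====
-- def is_sensitive(cmd):
--     """Filter out potentially sensitive commands."""
--     lower = cmd.lower()
--     sensitive_patterns = [
--         "password", "passwd", "secret", "token=",
--         "api_key", "apikey", "private_key",
--         ".kdbx",  # keepass
--         "credentials",
--     ]
--     for pat in sensitive_patterns:
--         if pat in lower:
--             return True
--     return False
-- ===== SOURCE B (Python) =====
-- _PATTERNS = ("password", "passwd", "secret", "token=",
--              "api_key", "apikey", "private_key",
--              ".kdbx",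
--              "credentials")
--
-- def is_sensitive(cmd):
--     """Filter out potentially sensitive commands (single scan over positions)."""
--     lower = cmd.lower()
--     for i in range(len(lower) + 1):
--         for p in _PATTERNS:
--             if lower.startswith(p, i):
--                 return True
--     return False
-- ===== Notes on version B (the rewrite author's own statement) =====
-- stated objective: alternative
-- what changed: Instead of scanning the whole lowered string once per pattern with a per-pattern substring membership test, B makes a single left-to-right scan over the positions of the lowered string and at each position tests whether any pattern starts there.
import Mathlib
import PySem

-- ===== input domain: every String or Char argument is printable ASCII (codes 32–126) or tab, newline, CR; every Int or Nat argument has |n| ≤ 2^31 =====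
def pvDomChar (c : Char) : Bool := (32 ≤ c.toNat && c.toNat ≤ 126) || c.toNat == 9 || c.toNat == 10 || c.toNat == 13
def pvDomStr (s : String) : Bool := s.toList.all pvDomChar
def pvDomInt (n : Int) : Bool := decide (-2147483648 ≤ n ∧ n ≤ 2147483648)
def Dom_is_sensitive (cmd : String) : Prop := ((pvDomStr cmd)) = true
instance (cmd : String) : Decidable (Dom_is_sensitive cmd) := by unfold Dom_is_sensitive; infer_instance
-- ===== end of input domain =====

-- B replaces A's per-pattern full-string scans by a single left-to-right scan over
-- positions, testing at each position whether any pattern starts there (objective: alternative).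

-- shared module constant: the sensitive pattern list (same in A and B)
def sensitivePatterns : List String :=
  ["password", "passwd", "secret", "token=",
   "api_key", "apikey", "private_key",
   ".kdbx",
   "credentials"]

-- ===== PORT A =====
-- 'for pat in patterns: if pat in lower: return True; return False' = any over the list
def is_sensitive (cmd : String) : Bool :=
  let lower := PySem.Str.lower cmd
  sensitivePatterns.any (fun pat => PySem.Str.isIn pat lower)

-- ===== PORT B =====
-- the scan over suffixes of the lowered string: lower.startswith(p, i) for each position i
def bScan (ps : List (List Char)) : List Char → Bool
  | [] => ps.any (fun p => PySem.Chars.startswith [] p)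
  | c :: rest => ps.any (fun p => PySem.Chars.startswith (c :: rest) p) || bScan ps rest

def is_sensitive_alt (cmd : String) : Bool :=
  bScan (sensitivePatterns.map String.toList) (PySem.Str.lower cmd).toList

-- ===== PRECONDITION & SPEC =====
def Spec_is_sensitive (cmd : String) (out : Bool) : Prop := out = is_sensitive_alt cmd
instance (cmd : String) (out : Bool) : Decidable (Spec_is_sensitive cmd out) := by unfold Spec_is_sensitive; infer_instance

-- ===== CLAIM (what is proved, stated in full; the proofs are below) =====
def Claim_equal_is_sensitive : Prop := ∀ (cmd : String), Dom_is_sensitive cmd → Spec_is_sensitive cmd (is_sensitive cmd)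

-- ===== LEMMAS AND PROOFS =====
-- the position scan finds a pattern iff some pattern is an infix ('pat in lower')
theorem bScan_eq_any_isIn (ps : List (List Char)) (s : List Char) :
    bScan ps s = ps.any (fun p => PySem.Chars.isIn p s) := by
  induction s with
  | nil =>
    rw [Bool.eq_iff_iff]
    simp only [bScan, List.any_eq_true, PySem.Chars.startswith_iff,
      PySem.Chars.isIn_iff_infix]
    simp
  | cons c rest ih =>
    rw [Bool.eq_iff_iff]
    simp only [bScan, ih, Bool.or_eq_true, List.any_eq_true,
      PySem.Chars.startswith_iff, PySem.Chars.isIn_iff_infix, List.infix_cons_iff]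
    constructor
    · rintro (⟨p, hp, h⟩ | ⟨p, hp, h⟩)
      · exact ⟨p, hp, Or.inl h⟩
      · exact ⟨p, hp, Or.inr h⟩
    · rintro ⟨p, hp, h | h⟩
      · exact Or.inl ⟨p, hp, h⟩
      · exact Or.inr ⟨p, hp, h⟩

-- ===== VERDICT (by name: the statement is the Claim_ definition above) =====
theorem is_sensitive_spec : Claim_equal_is_sensitive := by
  intro cmd _
  unfold Spec_is_sensitive is_sensitive is_sensitive_alt
  rw [bScan_eq_any_isIn, List.any_map]
  simp [PySem.Str.isIn, Function.comp_def]
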